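-- pv_equiv track=rewrite | github.com/SalmaDammak/TGGATES_utils | greedy_partition.py | evaluate_partition
-- ===== SOURCE A (Python) =====
-- from collections import Counter, defaultdict
--
-- def evaluate_partition(T, S):
--     """
--     Evaluates the quality of a partition by computing class balance difference.
--     Lower values indicate better balance.
--
--     Parameters:
--     T, S (list of tuples): Partitioned subgroups.
--
--     Returns:
--     int: Total imbalance score.
--     """
--     count_T, count_S = Counter(), Counter()
--     for _, subgroup in T:
--         count_T.update(subgroup)
--     for _, subgroup in S:
--         count_S.update(subgroup)
--
--     imbalance = sum(abs(count_T[label] - count_S[label]) for label in set(count_T.keys()).union(set(count_S.keys())))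
--     return imbalance
-- ===== SOURCE B (Python) =====
-- def evaluate_partition(T, S):
--     """
--     Evaluates the quality of a partition by computing class balance difference.
--     Lower values indicate better balance.
--
--     Parameters:
--     T, S (list of tuples): Partitioned subgroups.
--
--     Returns:
--     int: Total imbalance score.
--     """
--     # Sort-and-merge: the imbalance is the number of labels left unmatched
--     # when the two sorted label multisets are merged with two pointers.
--     xs = sorted(l for _, sub in T for l in sub)
--     ys = sorted(l for _, sub in S for l in sub)
--     i = j = imbalance = 0
--     while i < len(xs) and j < len(ys):
--         if xs[i] == ys[j]:
--             i += 1
--             j += 1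
--         elif xs[i] < ys[j]:
--             imbalance += 1
--             i += 1
--         else:
--             imbalance += 1
--             j += 1
--     return imbalance + (len(xs) - i) + (len(ys) - j)
-- ===== Notes on version B (the rewrite author's own statement) =====
-- stated objective: alternative
-- what changed: Replaces the Counter pair and key-set-union pass with a sort-then-merge scheme: both label multisets are sorted and a two-pointer merge counts the labels left unmatched, which equals the sum of absolute count differences.
import Mathlib
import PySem

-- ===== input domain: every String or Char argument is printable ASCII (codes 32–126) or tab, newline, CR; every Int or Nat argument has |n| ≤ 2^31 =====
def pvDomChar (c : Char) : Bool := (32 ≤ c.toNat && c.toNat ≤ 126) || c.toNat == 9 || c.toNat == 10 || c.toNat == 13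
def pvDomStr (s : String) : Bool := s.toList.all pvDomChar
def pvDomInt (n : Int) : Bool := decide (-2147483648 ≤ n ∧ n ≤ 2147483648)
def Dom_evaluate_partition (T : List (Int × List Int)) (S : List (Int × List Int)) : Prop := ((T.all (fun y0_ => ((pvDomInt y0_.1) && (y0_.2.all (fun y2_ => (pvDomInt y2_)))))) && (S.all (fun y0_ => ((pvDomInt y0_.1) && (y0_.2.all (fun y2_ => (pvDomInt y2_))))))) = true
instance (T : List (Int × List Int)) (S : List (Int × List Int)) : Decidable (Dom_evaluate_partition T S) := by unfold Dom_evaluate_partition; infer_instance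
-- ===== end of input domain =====

-- B replaces A's Counter pair and key-set union by sorting both label multisets and
-- counting unmatched labels in a two-pointer merge; objective: alternative algorithm.

-- ===== PORT A =====
def evaluate_partition (T : List (Int × List Int)) (S : List (Int × List Int)) : Int :=
  let count_T := T.foldl (fun d p => p.2.foldl (fun d x => d.modify x 0 (· + 1)) d) (PySem.Dict.empty : PySem.Dict Int Int)
  let count_S := S.foldl (fun d p => p.2.foldl (fun d x => d.modify x 0 (· + 1)) d) (PySem.Dict.empty : PySem.Dict Int Int)
  -- sum over set(count_T.keys()).union(set(count_S.keys())); order-independent (a sum of Ints)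
  let labels := PySem.Set.union (PySem.Set.ofList count_T.keys) (PySem.Set.ofList count_S.keys)
  (labels.map (fun label => |count_T.getD label 0 - count_S.getD label 0|)).sum

-- ===== PORT B =====
-- Source B's while-loop over indices i, j, transcribed as the obvious recursion consuming
-- the two sorted lists' heads; the final '+ (len-i) + (len-j)' is the two base cases.
def pvMergeDiff : List Int → List Int → Int
  | [], ys => ys.length
  | x :: xs, [] => (x :: xs).length
  | x :: xs, y :: ys =>
      if x = y then pvMergeDiff xs ys
      else if x < y then 1 + pvMergeDiff xs (y :: ys)
      else 1 + pvMergeDiff (x :: xs) ys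
termination_by xs ys => xs.length + ys.length

def evaluate_partition_alt (T : List (Int × List Int)) (S : List (Int × List Int)) : Int :=
  let xs := PySem.List.sorted (T.flatMap (·.2)) (fun x => x) false
  let ys := PySem.List.sorted (S.flatMap (·.2)) (fun x => x) false
  pvMergeDiff xs ys

-- ===== PRECONDITION & SPEC =====
def Spec_evaluate_partition (T : List (Int × List Int)) (S : List (Int × List Int)) (out : Int) : Prop := out = evaluate_partition_alt T S
instance (T : List (Int × List Int)) (S : List (Int × List Int)) (out : Int) : Decidable (Spec_evaluate_partition T S out) := by unfold Spec_evaluate_partition; infer_instance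

-- ===== CLAIM (what is proved, stated in full; the proofs are below) =====
def Claim_equal_evaluate_partition : Prop := ∀ (T : List (Int × List Int)) (S : List (Int × List Int)), Dom_evaluate_partition T S → Spec_evaluate_partition T S (evaluate_partition T S)

-- ===== LEMMAS AND PROOFS =====

-- A's counter loop: value at v is the number of occurrences of v across all subgroups.
lemma pv_countA_getD (L : List (Int × List Int)) (d : PySem.Dict Int Int) (v : Int) :
    (L.foldl (fun d p => p.2.foldl (fun d x => d.modify x 0 (· + 1)) d) d).getD v 0
      = d.getD v 0 + ((L.flatMap (·.2)).count v : Int) := by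
  induction L generalizing d with
  | nil => simp
  | cons p L ih =>
      rw [List.foldl_cons, ih, PySem.Dict.getD_foldl_modify_add_one, List.flatMap_cons,
        List.count_append]
      push_cast; ring

-- A's counter loop: the key list is the first-occurrence dedup of all labels.
lemma pv_countA_keys (L : List (Int × List Int)) (d : PySem.Dict Int Int) :
    (L.foldl (fun d p => p.2.foldl (fun d x => d.modify x 0 (· + 1)) d) d).keys
      = PySem.Set.update d.keys (L.flatMap (·.2)) := by
  induction L generalizing d with
  | nil => simp [PySem.Set.update]
  | cons p L ih =>
      rw [List.foldl_cons, ih, PySem.Dict.keys_foldl_modify, List.flatMap_cons]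
      simp [PySem.Set.update, List.foldl_append]

-- multiset subtraction past a fresh head, both sides
lemma pv_cons_sub_of_notMem (x : Int) (X Y : Multiset Int) (h : x ∉ Y) :
    (x ::ₘ X) - Y = x ::ₘ (X - Y) := by
  ext v
  rw [Multiset.count_sub, Multiset.count_cons, Multiset.count_cons, Multiset.count_sub]
  by_cases hv : v = x
  · subst hv; rw [Multiset.count_eq_zero_of_notMem h]; omega
  · simp [hv]

lemma pv_sub_cons_of_notMem (x : Int) (X Y : Multiset Int) (h : x ∉ Y) :
    Y - (x ::ₘ X) = Y - X := by
  ext v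
  rw [Multiset.count_sub, Multiset.count_sub, Multiset.count_cons]
  by_cases hv : v = x
  · subst hv; rw [Multiset.count_eq_zero_of_notMem h]; simp
  · simp [hv]

-- the merge recursion computes the size of the symmetric multiset difference of sorted lists
lemma pv_mergeDiff_eq (xs ys : List Int)
    (hx : xs.Pairwise (· ≤ ·)) (hy : ys.Pairwise (· ≤ ·)) :
    pvMergeDiff xs ys
      = ((↑xs - ↑ys : Multiset Int).card : Int) + ((↑ys - ↑xs : Multiset Int).card : Int) := by
  fun_induction pvMergeDiff xs ys with
  | case1 ys => simp
  | case2 x xs => simp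
  | case3 x xs ys ih =>
      rw [List.pairwise_cons] at hx hy
      have := ih hx.2 hy.2
      simpa [Multiset.sub_cons, Multiset.erase_cons_head] using this
  | case4 x xs y ys hne hlt ih =>
      have hy1 := (List.pairwise_cons.1 hy).1
      have hx2 := (List.pairwise_cons.1 hx).2
      have hnm : x ∉ (↑(y :: ys) : Multiset Int) := by
        rw [Multiset.mem_coe, List.mem_cons]
        rintro (rfl | hm)
        · exact lt_irrefl x hlt
        · exact absurd (lt_of_lt_of_le hlt (hy1 _ hm)) (lt_irrefl x)
      rw [ih hx2 hy]
      rw [show ((x :: xs : List Int) : Multiset Int) = x ::ₘ ↑xs from rfl,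
        pv_cons_sub_of_notMem x _ _ hnm, pv_sub_cons_of_notMem x _ _ hnm,
        Multiset.card_cons]
      push_cast; ring
  | case5 x xs y ys hne hnlt ih =>
      have hx1 := (List.pairwise_cons.1 hx).1
      have hy2 := (List.pairwise_cons.1 hy).2
      have hylt : y < x := by
        rcases lt_trichotomy x y with h | h | h
        · exact absurd h hnlt
        · exact absurd h hne
        · exact h
      have hnm : y ∉ (↑(x :: xs) : Multiset Int) := by
        rw [Multiset.mem_coe, List.mem_cons]
        rintro (rfl | hm)
        · exact lt_irrefl y hylt
        · exact absurd (lt_of_lt_of_le hylt (hx1 _ hm)) (lt_irrefl y)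
      rw [ih hx hy2]
      rw [show ((y :: ys : List Int) : Multiset Int) = y ::ₘ ↑ys from rfl,
        pv_cons_sub_of_notMem y _ _ hnm, pv_sub_cons_of_notMem y _ _ hnm,
        Multiset.card_cons]
      push_cast; ring

lemma pv_absNatSub (a b : ℕ) :
    |(a : Int) - b| = ((a - b : ℕ) : Int) + ((b - a : ℕ) : Int) := by
  rcases le_total a b with h | h
  · rw [abs_of_nonpos (by omega)]; omega
  · rw [abs_of_nonneg (by omega)]; omega

-- sum of |count difference| over a nodup support list = size of the symmetric multiset difference
lemma pv_sumAbs_eq_cards (U LT LS : List Int) (hnd : U.Nodup)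
    (hmem : ∀ v, v ∈ U ↔ v ∈ LT ∨ v ∈ LS) :
    (U.map (fun v => |(LT.count v : Int) - (LS.count v : Int)|)).sum
      = ((↑LT - ↑LS : Multiset Int).card : Int) + ((↑LS - ↑LT : Multiset Int).card : Int) := by
  classical
  have hsum : (U.map (fun v => |(LT.count v : Int) - (LS.count v : Int)|)).sum
      = ∑ v ∈ U.toFinset, |(LT.count v : Int) - (LS.count v : Int)| := by
    rw [List.sum_toFinset _ hnd]
  have hcard : ∀ (m n : List Int), (∀ v, v ∈ m → v ∈ U.toFinset) →
      ((↑m - ↑n : Multiset Int).card : Int)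
        = ∑ v ∈ U.toFinset, ((m.count v - n.count v : ℕ) : Int) := by
    intro m n hsub
    have h1 : (↑m - ↑n : Multiset Int).card
        = ∑ v ∈ U.toFinset, (↑m - ↑n : Multiset Int).count v := by
      rw [← Multiset.toFinset_sum_count_eq (↑m - ↑n : Multiset Int)]
      refine Finset.sum_subset ?_ ?_
      · intro v hv
        have : v ∈ (↑m - ↑n : Multiset Int) := Multiset.mem_toFinset.1 hv
        have : v ∈ (↑m : Multiset Int) := Multiset.mem_of_le (Multiset.sub_le_self _ _) this
        exact hsub v (Multiset.mem_coe.1 this)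
      · intro v _ hv
        exact Multiset.count_eq_zero_of_notMem (fun h => hv (Multiset.mem_toFinset.2 h))
    rw [h1]
    push_cast
    refine Finset.sum_congr rfl (fun v _ => ?_)
    rw [Multiset.count_sub, Multiset.coe_count, Multiset.coe_count]
  rw [hsum,
    hcard LT LS (fun v hv => List.mem_toFinset.2 ((hmem v).2 (Or.inl hv))),
    hcard LS LT (fun v hv => List.mem_toFinset.2 ((hmem v).2 (Or.inr hv))),
    ← Finset.sum_add_distrib]
  refine Finset.sum_congr rfl (fun v _ => pv_absNatSub _ _)

-- ===== VERDICT (by name: the statement is the Claim_ definition above) =====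
theorem evaluate_partition_spec : Claim_equal_evaluate_partition := by
  intro T S _
  unfold Spec_evaluate_partition evaluate_partition evaluate_partition_alt
  dsimp only
  set LT := T.flatMap (·.2) with hLT
  set LS := S.flatMap (·.2) with hLS
  set U := PySem.Set.union
      (PySem.Set.ofList (T.foldl (fun d p => p.2.foldl (fun d x => d.modify x 0 (· + 1)) d) (PySem.Dict.empty : PySem.Dict Int Int)).keys)
      (PySem.Set.ofList (S.foldl (fun d p => p.2.foldl (fun d x => d.modify x 0 (· + 1)) d) (PySem.Dict.empty : PySem.Dict Int Int)).keys) with hU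
  -- A's summand at each label is the |count difference| of the flattened label lists
  have hAvals : U.map (fun label =>
      |(T.foldl (fun d p => p.2.foldl (fun d x => d.modify x 0 (· + 1)) d) (PySem.Dict.empty : PySem.Dict Int Int)).getD label 0
        - (S.foldl (fun d p => p.2.foldl (fun d x => d.modify x 0 (· + 1)) d) (PySem.Dict.empty : PySem.Dict Int Int)).getD label 0|)
      = U.map (fun v => |(LT.count v : Int) - (LS.count v : Int)|) := by
    refine List.map_congr_left (fun k _ => ?_)
    rw [pv_countA_getD, pv_countA_getD]
    simp [← hLT, ← hLS]
  have hUnodup : U.Nodup := PySem.Set.nodup_union _ _ (PySem.Set.nodup_ofList _)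
  have hmem : ∀ a : Int, a ∈ U ↔ a ∈ LT ∨ a ∈ LS := by
    intro a
    rw [hU, PySem.Set.mem_union, PySem.Set.mem_ofList, PySem.Set.mem_ofList,
      pv_countA_keys, pv_countA_keys, PySem.Set.mem_update, PySem.Set.mem_update]
    simp [hLT, hLS]
  rw [hAvals, pv_sumAbs_eq_cards U LT LS hUnodup hmem,
    pv_mergeDiff_eq _ _
      (by simpa using PySem.List.sorted_pairwise LT (fun x => x))
      (by simpa using PySem.List.sorted_pairwise LS (fun x => x))]
  have hpT : ((PySem.List.sorted LT (fun x => x) false : List Int) : Multiset Int) = (↑LT : Multiset Int) :=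
    Quot.sound (PySem.List.sorted_perm LT (fun x => x) false)
  have hpS : ((PySem.List.sorted LS (fun x => x) false : List Int) : Multiset Int) = (↑LS : Multiset Int) :=
    Quot.sound (PySem.List.sorted_perm LS (fun x => x) false)
  rw [hpT, hpS]
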